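-- pv_equiv track=rewrite | github.com/internaldevelop/firmware_analyze_serv | utils/fs/fs_base.py | is_normal_file
-- ===== SOURCE A (Python) =====
-- def is_normal_file(name_str):
--     # name_str = str(name, encoding="utf-8")
--     # 没有后缀的无法判断，直接返回 False
--     if name_str.find('.') < 0:
--         return False
--
--     ext_list = ['.html', '.png', '.gif', '.js', '.css', '.php', '.svg', '.conf', '.key', '.pem', '.woff',
--                 '.sh', '.swf', '.py']
--     for ext_name in ext_list:
--         start = 0 - len(ext_name)
--         if name_str[start:] == ext_name:
--             return True
--     return False
-- ===== SOURCE B (Python) =====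
-- _EXTS = {'html', 'png', 'gif', 'js', 'css', 'php', 'svg', 'conf', 'key', 'pem',
--          'woff', 'sh', 'swf', 'py'}
--
--
-- def is_normal_file(name_str):
--     # No dot at all: cannot tell the extension, mirror the guard.
--     if '.' not in name_str:
--         return False
--     # Single reverse scan collecting the characters after the LAST dot,
--     # then one set membership test (no per-extension suffix comparisons).
--     rev_ext = []
--     for ch in reversed(name_str):
--         if ch == '.':
--             break
--         rev_ext.append(ch)
--     return ''.join(reversed(rev_ext)) in _EXTS
-- ===== Notes on version B (the rewrite author's own statement) =====
-- stated objective: alternative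
-- what changed: Replaces the 14-iteration endswith/negative-slice loop with a single reverse scan that extracts the token after the last dot and one set membership test.
import Mathlib
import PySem

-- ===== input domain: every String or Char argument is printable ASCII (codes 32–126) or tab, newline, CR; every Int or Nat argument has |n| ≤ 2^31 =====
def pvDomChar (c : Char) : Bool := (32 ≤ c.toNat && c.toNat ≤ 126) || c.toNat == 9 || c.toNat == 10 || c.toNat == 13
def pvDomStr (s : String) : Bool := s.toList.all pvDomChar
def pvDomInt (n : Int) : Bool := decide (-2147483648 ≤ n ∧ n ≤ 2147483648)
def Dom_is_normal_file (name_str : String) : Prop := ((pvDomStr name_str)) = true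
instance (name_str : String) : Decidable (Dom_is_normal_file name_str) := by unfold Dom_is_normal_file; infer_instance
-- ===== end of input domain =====

-- B replaces A's 14-iteration suffix-comparison loop by one reverse scan extracting
-- the token after the last dot plus a single set membership test (alternative algorithm).


-- ===== PORT A =====
-- ext_list, written as lists of characters (all string work is done on the toList side)
def extListA : List (List Char) :=
  [['.','h','t','m','l'], ['.','p','n','g'], ['.','g','i','f'], ['.','j','s'],
   ['.','c','s','s'], ['.','p','h','p'], ['.','s','v','g'], ['.','c','o','n','f'],
   ['.','k','e','y'], ['.','p','e','m'], ['.','w','o','f','f'], ['.','s','h'],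
   ['.','s','w','f'], ['.','p','y']]

-- the for-loop over ext_list: `start = 0 - len(ext_name); if name_str[start:] == ext_name: return True`
def aExtLoop (s : List Char) : List (List Char) → Bool
  | [] => false
  | e :: rest =>
      if PySem.List.slice s (some (0 - (e.length : Int))) none = e then true
      else aExtLoop s rest

def is_normal_file (name_str : String) : Bool :=
  if PySem.Str.find name_str "." < 0 then false
  else aExtLoop name_str.toList extListA

-- ===== PORT B =====
-- _EXTS, the extensions without their leading dot
def extSetB : List (List Char) :=
  [['h','t','m','l'], ['p','n','g'], ['g','i','f'], ['j','s'],
   ['c','s','s'], ['p','h','p'], ['s','v','g'], ['c','o','n','f'],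
   ['k','e','y'], ['p','e','m'], ['w','o','f','f'], ['s','h'],
   ['s','w','f'], ['p','y']]

-- the `for ch in reversed(name_str): if ch == '.': break; rev_ext.append(ch)` loop
def collectRevExt : List Char → List Char
  | [] => []
  | c :: rest => if c = '.' then [] else c :: collectRevExt rest

def is_normal_file_alt (name_str : String) : Bool :=
  if PySem.Str.isIn "." name_str then
    extSetB.contains (collectRevExt name_str.toList.reverse).reverse
  else false

-- ===== PRECONDITION & SPEC =====
def Spec_is_normal_file (name_str : String) (out : Bool) : Prop := out = is_normal_file_alt name_str
instance (name_str : String) (out : Bool) : Decidable (Spec_is_normal_file name_str out) := by unfold Spec_is_normal_file; infer_instance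

-- ===== CLAIM (what is proved, stated in full; the proofs are below) =====
def Claim_equal_is_normal_file : Prop := ∀ (name_str : String), Dom_is_normal_file name_str → Spec_is_normal_file name_str (is_normal_file name_str)

-- ===== LEMMAS AND PROOFS =====

-- A's clamped negative start index: s[-k:] starts at position len - k (Nat subtraction)
theorem clampIdx_neg (n k : Nat) (hk : 0 < k) :
    PySem.List.clampIdx n (0 - (k : Int)) = n - k := by
  simp only [PySem.List.clampIdx]
  split_ifs <;> omega

-- A's negative slice s[-|e|:] equals e iff e is a suffix of s (for nonempty e)
theorem slice_neg_eq_iff (s e : List Char) (he : e ≠ []) :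
    (PySem.List.slice s (some (0 - (e.length : Int))) none = e) ↔ e <:+ s := by
  have hk : 0 < e.length := List.length_pos_iff.mpr he
  have hs : PySem.List.slice s (some (0 - (e.length : Int))) none
      = List.drop (s.length - e.length) s := by
    simp only [PySem.List.slice, clampIdx_neg s.length e.length hk]
    exact List.take_of_length_le (by simp)
  rw [hs, List.suffix_iff_eq_drop, eq_comm]

-- A's loop is an existential over the list
theorem aExtLoop_iff (s : List Char) (l : List (List Char)) :
    aExtLoop s l = true ↔ ∃ e ∈ l, PySem.List.slice s (some (0 - (e.length : Int))) none = e := by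
  induction l with
  | nil => simp [aExtLoop]
  | cons e rest ih =>
      simp only [aExtLoop, zero_sub] at *
      split_ifs with h
      · simp [h]
      · simp only [List.mem_cons]
        rw [ih]
        constructor
        · rintro ⟨a, ha, hsl⟩
          exact ⟨a, Or.inr ha, hsl⟩
        · rintro ⟨a, ha | ha, hsl⟩
          · exact absurd (ha ▸ hsl) h
          · exact ⟨a, ha, hsl⟩

-- B's loop is takeWhile (≠ '.')
theorem collectRevExt_eq_takeWhile (r : List Char) :
    collectRevExt r = r.takeWhile (fun c => !(c == '.')) := by
  induction r with
  | nil => rfl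
  | cons c rest ih =>
      by_cases h : c = '.'
      · simp [collectRevExt, h]
      · simp [collectRevExt, h, ih]

-- a dot-free block followed by a dot is exactly what takeWhile (≠ '.') collects
theorem takeWhile_no_dot (l t : List Char) (h : '.' ∉ l) :
    (l ++ '.' :: t).takeWhile (fun c => !(c == '.')) = l := by
  induction l with
  | nil => simp
  | cons c cs ih =>
      simp only [List.mem_cons, not_or] at h
      have hc : ¬ c = '.' := fun hh => h.1 hh.symm
      simp [hc, ih h.2]

-- key: when s contains a dot and e is dot-free, ".e" is a suffix of s exactly
-- when the token after the LAST dot is e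
theorem suffix_dot_iff (s e : List Char) (hd : '.' ∈ s) (hno : '.' ∉ e) :
    ('.' :: e <:+ s) ↔ (s.reverse.takeWhile (fun c => !(c == '.'))).reverse = e := by
  rw [← List.reverse_prefix (l₁ := '.' :: e) (l₂ := s), List.reverse_eq_iff]
  have hrev : ('.' :: e).reverse = e.reverse ++ ['.'] := by simp
  rw [hrev]
  have hdr : '.' ∈ s.reverse := by simpa using hd
  have hnor : '.' ∉ e.reverse := by simpa using hno
  constructor
  · rintro ⟨t, ht⟩
    rw [← ht, List.append_assoc]
    exact takeWhile_no_dot e.reverse t hnor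
  · intro htw
    have hsplit := List.takeWhile_append_dropWhile
      (p := fun c => !(c == '.')) (l := s.reverse)
    have hdne : s.reverse.dropWhile (fun c => !(c == '.')) ≠ [] := by
      intro h0
      rw [h0, List.append_nil, htw] at hsplit
      exact hnor (hsplit ▸ hdr)
    obtain ⟨c, d, hcd⟩ := List.exists_cons_of_ne_nil hdne
    have hc : c = '.' := by
      have hh := List.head_dropWhile_not (fun c => !(c == '.')) hdne
      simp only [hcd, List.head_cons] at hh
      simpa using hh
    subst hc
    refine ⟨d, ?_⟩
    rw [List.append_assoc]
    show e.reverse ++ ('.' :: d) = s.reverse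
    rw [← htw, ← hcd]
    exact hsplit

-- every stored extension is nonempty and dot-free
theorem extSetB_facts : ∀ e ∈ extSetB, '.' ∉ e ∧ e ≠ [] := by decide

theorem extListA_eq_map : extListA = extSetB.map (fun e => '.' :: e) := by rfl

-- the dot-present case: A's loop agrees with B's membership test
theorem dot_case (s : List Char) (hd : '.' ∈ s) :
    aExtLoop s extListA
      = extSetB.contains ((s.reverse.takeWhile (fun c => !(c == '.'))).reverse) := by
  rw [Bool.eq_iff_iff, aExtLoop_iff, List.contains_iff_mem]
  constructor
  · rintro ⟨de, hde, hsl⟩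
    rw [extListA_eq_map, List.mem_map] at hde
    obtain ⟨e, he, rfl⟩ := hde
    rw [slice_neg_eq_iff s ('.' :: e) (by simp)] at hsl
    rw [suffix_dot_iff s e hd (extSetB_facts e he).1] at hsl
    rw [hsl]
    exact he
  · intro hX
    refine ⟨'.' :: ((s.reverse.takeWhile (fun c => !(c == '.'))).reverse), ?_, ?_⟩
    · rw [extListA_eq_map, List.mem_map]
      exact ⟨_, hX, rfl⟩
    · rw [slice_neg_eq_iff s _ (by simp)]
      exact (suffix_dot_iff s _ hd (extSetB_facts _ hX).1).mpr rfl

-- the Python guards coincide: find(...) < 0 iff '.' not in s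
theorem toList_dot : (".":String).toList = ['.'] := rfl

-- ===== VERDICT (by name: the statement is the Claim_ definition above) =====
theorem is_normal_file_spec : Claim_equal_is_normal_file := by
  intro name_str _
  unfold Spec_is_normal_file is_normal_file is_normal_file_alt
  by_cases hin : PySem.Str.isIn "." name_str = true
  · have hinf : ['.'] <:+: name_str.toList := by
      have h1 := (PySem.Str.isIn_iff_infix _ _).mp hin
      rwa [toList_dot] at h1
    have hmem : '.' ∈ name_str.toList := by
      obtain ⟨u, v, huv⟩ := hinf
      rw [← huv]; simp
    have hfind : ¬ (PySem.Str.find name_str "." < 0) := by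
      have h0 : 0 ≤ PySem.Chars.find name_str.toList ['.'] :=
        (PySem.Chars.find_nonneg_iff _ _).mpr hinf
      simp only [PySem.Str.find_eq, toList_dot]
      omega
    rw [if_neg hfind, if_pos hin, collectRevExt_eq_takeWhile]
    exact dot_case name_str.toList hmem
  · have hninf : ¬ (['.'] <:+: name_str.toList) := by
      intro h
      exact hin ((PySem.Str.isIn_iff_infix _ _).mpr (by rwa [toList_dot]))
    have hfind : PySem.Str.find name_str "." < 0 := by
      have h1 : PySem.Chars.find name_str.toList ['.'] = -1 :=
        (PySem.Chars.find_eq_neg_one_iff _ _).mpr hninf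
      simp only [PySem.Str.find_eq, toList_dot, h1]
      omega
    rw [if_pos hfind, if_neg hin]
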